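-- pv_equiv track=rewrite | github.com/OxQuasar/nous-memories | iching/reversal/Q2/phase1_p7_orbits.py | is_invertible_f2
-- ===== SOURCE A (Python) =====
-- def is_invertible_f2(M, n):
--     """Gaussian elimination mod 2. M is list of n row-ints."""
--     rows = list(M)
--     for col_bit in range(n):
--         col_mask = 1 << (n - 1 - col_bit)
--         pivot = None
--         for r in range(col_bit, n):
--             if rows[r] & col_mask:
--                 pivot = r
--                 break
--         if pivot is None:
--             return False
--         rows[col_bit], rows[pivot] = rows[pivot], rows[col_bit]
--         for r in range(n):
--             if r != col_bit and rows[r] & col_mask: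
--                 rows[r] ^= rows[col_bit]
--     return True
-- ===== SOURCE B (Python) =====
-- def is_invertible_f2(M, n):
--     """XOR linear-basis rank check on the low n bits of the first n rows."""
--     if n <= 0:
--         return True
--     basis = [0] * n          # basis[b]: vector whose highest set bit is b, or 0
--     for x in M[:n]:
--         cur = x % (1 << n)   # low n bits, as a nonnegative int
--         while cur:
--             b = cur.bit_length() - 1
--             if basis[b]:
--                 cur ^= basis[b]
--             else:
--                 basis[b] = cur
--                 break
--         if not cur:
--             return False
--     return True
-- ===== Notes on version B (the rewrite author's own statement) =====
-- stated objective: faster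
-- what changed: Replaces column-wise Gauss-Jordan elimination (pivot search, row swap, full back-substitution over the whole matrix per column) by a single row-wise pass that inserts each row into an XOR linear basis indexed by highest set bit, failing as soon as a row reduces to 0.
import Mathlib
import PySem

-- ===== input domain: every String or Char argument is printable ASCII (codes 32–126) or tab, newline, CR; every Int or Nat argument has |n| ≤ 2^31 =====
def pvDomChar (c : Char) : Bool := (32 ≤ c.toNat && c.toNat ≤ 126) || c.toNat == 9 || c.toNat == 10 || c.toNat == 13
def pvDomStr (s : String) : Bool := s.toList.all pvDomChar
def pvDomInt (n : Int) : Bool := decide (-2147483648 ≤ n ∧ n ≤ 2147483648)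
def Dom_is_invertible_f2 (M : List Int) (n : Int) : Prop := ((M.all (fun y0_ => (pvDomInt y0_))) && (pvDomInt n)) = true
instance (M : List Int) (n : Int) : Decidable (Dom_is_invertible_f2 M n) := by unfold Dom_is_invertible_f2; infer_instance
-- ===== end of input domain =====

-- B replaces A's column-wise Gauss-Jordan elimination by a one-pass XOR linear-basis
-- rank check over the low n bits (measured faster by a constant factor; proof is about
-- the return value only — neither program mutates its arguments).

-- ===== PORT A =====
-- for r in range(col_bit, n): if rows[r] & col_mask: pivot = r; break
def pivotFind (rows : List Int) (colMask : Int) : List Int → Option Int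
  | [] => none
  | r :: rest =>
    if PySem.Int.band (PySem.List.pyGetD rows r 0) colMask ≠ 0 then some r
    else pivotFind rows colMask rest

-- body of: for r in range(n): if r != col_bit and rows[r] & col_mask: rows[r] ^= rows[col_bit]
def elimStep (colBit colMask : Int) (rows : List Int) (r : Int) : List Int :=
  if r ≠ colBit ∧ PySem.Int.band (PySem.List.pyGetD rows r 0) colMask ≠ 0 then
    PySem.List.pySetD rows r
      (PySem.Int.bxor (PySem.List.pyGetD rows r 0) (PySem.List.pyGetD rows colBit 0))
  else rows

-- for col_bit in range(n): …  (structural recursion over the remaining range list)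
def gaussLoop (n : Int) : List Int → List Int → Bool
  | _rows, [] => true
  | rows, colBit :: restCols =>
    -- col_mask = 1 << (n - 1 - col_bit); the exponent is ≥ 0 on every loop iteration
    let colMask : Int := (1 : Int) <<< (n - 1 - colBit).toNat
    match pivotFind rows colMask (PySem.List.pyRange colBit n 1) with
    | none => false
    | some p =>
      -- rows[col_bit], rows[pivot] = rows[pivot], rows[col_bit]
      let a := PySem.List.pyGetD rows p 0
      let b := PySem.List.pyGetD rows colBit 0
      let rows1 := PySem.List.pySetD (PySem.List.pySetD rows colBit a) p b
      let rows2 := (PySem.List.pyRange 0 n 1).foldl (elimStep colBit colMask) rows1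
      gaussLoop n rows2 restCols

def is_invertible_f2 (M : List Int) (n : Int) : Bool :=
  gaussLoop n M (PySem.List.pyRange 0 n 1)

-- ===== PORT B =====
-- while cur: reduce cur by the basis entry owning its top bit, or install it.
-- Terminates because each xor clears the current top bit, so cur strictly decreases;
-- the dite guard only realises that measure (it is never false on reachable bases).
def altReduce (basis : List Nat) (cur : Nat) : Option (List Nat) :=
  if cur = 0 then none
  else
    let b := PySem.Int.bitLength (cur : Int) - 1   -- cur.bit_length() - 1
    let v := basis.getD b 0                        -- basis[b]; b < len(basis) on reachable inputs
    if v ≠ 0 then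
      if h : cur ^^^ v < cur then altReduce basis (cur ^^^ v) else none
    else some (basis.set b cur)                    -- basis[b] = cur
termination_by cur
decreasing_by exact h

-- for x in M[:n]: …
def altRows (basis : List Nat) : List Nat → Bool
  | [] => true
  | x :: rest =>
    match altReduce basis x with
    | none => false
    | some basis' => altRows basis' rest

def is_invertible_f2_alt (M : List Int) (n : Int) : Bool :=
  if n ≤ 0 then true
  else
    -- cur = x % (1 << n) is a nonnegative Python int: represented as the Nat toNat
    altRows (List.replicate n.toNat 0)
      ((PySem.List.slice M none (some n)).map
        (fun x => (PySem.Int.mod x ((1 : Int) <<< n.toNat)).toNat))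

-- ===== PRECONDITION & SPEC =====
-- A raises IndexError (rows[r] with r ≥ len(M)) exactly when n > len(M); Pre_ excludes those inputs.
def Pre_is_invertible_f2 (M : List Int) (n : Int) : Prop := n ≤ (M.length : Int)
instance (M : List Int) (n : Int) : Decidable (Pre_is_invertible_f2 M n) := by
  unfold Pre_is_invertible_f2; infer_instance

def pvWitness_is_invertible_f2 : List Int × Int := ([3, 1], 2)

def Spec_is_invertible_f2 (M : List Int) (n : Int) (out : Bool) : Prop := out = is_invertible_f2_alt M n
instance (M : List Int) (n : Int) (out : Bool) : Decidable (Spec_is_invertible_f2 M n out) := by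
  unfold Spec_is_invertible_f2; infer_instance

-- ===== CLAIM (what is proved, stated in full; the proofs are below) =====
def Claim_equal_is_invertible_f2 : Prop := ∀ (M : List Int) (n : Int), Dom_is_invertible_f2 M n → Pre_is_invertible_f2 M n → Spec_is_invertible_f2 M n (is_invertible_f2 M n)

-- ===== LEMMAS AND PROOFS =====

-- ===== Section 1: Nat bit helpers =====
theorem pvGeOfTestBit {m t : Nat} (h : m.testBit t = true) : 2 ^ t ≤ m := by
  by_contra hlt
  rw [Nat.testBit_lt_two_pow (by omega)] at h; exact Bool.false_ne_true h

theorem pvTestBitOfBetween {m t : Nat} (h1 : 2 ^ t ≤ m) (h2 : m < 2 ^ (t + 1)) :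
    m.testBit t = true := by
  have h2t : (0:Nat) < 2 ^ t := Nat.two_pow_pos _
  have hlo : 1 ≤ m / 2 ^ t := (Nat.one_le_div_iff h2t).2 h1
  have hhi : m / 2 ^ t < 2 := by
    apply (Nat.div_lt_iff_lt_mul h2t).2
    calc m < 2 ^ (t+1) := h2
    _ = 2 ^ t * 2 := by rw [Nat.pow_succ]
    _ ≤ 2 * 2 ^ t := by omega
  have hd : m / 2 ^ t = 1 := by omega
  rw [Nat.testBit_eq_decide_div_mod_eq, hd]; decide

theorem pvLtOfClear {m t : Nat} (h1 : m < 2 ^ (t + 1)) (h2 : m.testBit t = false) : m < 2 ^ t := by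
  by_contra hge
  rw [pvTestBitOfBetween (by omega) h1] at h2; exact (by simp at h2)

theorem pvLog2Eq {m t : Nat} (h1 : 2 ^ t ≤ m) (h2 : m < 2 ^ (t + 1)) : m.log2 = t := by
  have hm : m ≠ 0 := by have : (0:Nat) < 2 ^ t := Nat.two_pow_pos _; omega
  have hu : m.log2 < t + 1 := (Nat.log2_lt hm).2 h2
  have hl : t ≤ m.log2 := (Nat.le_log2 hm).2 h1
  omega

theorem pvLog2Range {m : Nat} (h : m ≠ 0) : 2 ^ m.log2 ≤ m ∧ m < 2 ^ (m.log2 + 1) :=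
  ⟨Nat.log2_self_le h, Nat.lt_log2_self⟩

theorem pvTestBitLog2 {m : Nat} (h : m ≠ 0) : m.testBit m.log2 = true :=
  pvTestBitOfBetween (Nat.log2_self_le h) Nat.lt_log2_self

theorem pvLog2Lt {m n : Nat} (h : m ≠ 0) (hb : m < 2 ^ n) : m.log2 < n := (Nat.log2_lt h).2 hb

-- xor of two values with the same top bit is smaller
theorem pvXorLtOfLog2Eq {a b : Nat} (ha : a ≠ 0) (hb : b ≠ 0) (h : a.log2 = b.log2) :
    a ^^^ b < a := by
  have h1 := pvLog2Range ha; have h2 := pvLog2Range hb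
  have hx : (a ^^^ b) < 2 ^ (a.log2 + 1) :=
    Nat.xor_lt_two_pow h1.2 (h ▸ h2.2)
  have hbit : (a ^^^ b).testBit a.log2 = false := by
    have hb2 : b.testBit a.log2 = true := by rw [h]; exact pvTestBitLog2 hb
    rw [Nat.testBit_xor, pvTestBitLog2 ha, hb2]; rfl
  have := pvLtOfClear hx hbit
  omega

-- complement inside an all-ones mask: (2^n - 1) - s = (2^n - 1) ^^^ s
theorem pvMaskSubEqXor : ∀ (n : Nat) (s : Nat), s < 2 ^ n → (2 ^ n - 1) - s = (2 ^ n - 1) ^^^ s := by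
  intro n
  induction n with
  | zero => intro s hs; interval_cases s <;> rfl
  | succ n ih =>
    intro s hs
    have hsd : s = Nat.bit (decide (s % 2 = 1)) (s / 2) := by
      simp [Nat.bit]; rcases Nat.mod_two_eq_zero_or_one s with h | h <;> simp [h] <;> omega
    have hmd : 2 ^ (n+1) - 1 = Nat.bit true (2 ^ n - 1) := by
      simp [Nat.bit]; have : (0:Nat) < 2 ^ n := Nat.two_pow_pos _
      rw [Nat.pow_succ]; omega
    have hs2 : s / 2 < 2 ^ n := by
      have : 2 ^ (n+1) = 2 ^ n * 2 := Nat.pow_succ 2 n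
      omega
    rw [hmd, hsd, Nat.xor_bit, ← ih _ hs2]
    rcases Nat.mod_two_eq_zero_or_one s with h | h <;>
      simp [Nat.bit, h] <;>
      · have h2 : 2 ^ (n+1) = 2 ^ n * 2 := Nat.pow_succ 2 n
        have : (0:Nat) < 2 ^ n := Nat.two_pow_pos _
        have hdm := Nat.div_add_mod s 2
        omega

-- ===== Section 2: F2 span (Sp) and linear dependence (Dep) over Nat-with-xor =====
inductive Sp : List Nat → Nat → Prop
  | zero (L : List Nat) : Sp L 0
  | step {L : List Nat} {x v : Nat} : x ∈ L → Sp L v → Sp L (x ^^^ v)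

theorem sp_mono {L L' : List Nat} (h : ∀ a ∈ L, a ∈ L') {v : Nat} (hv : Sp L v) : Sp L' v := by
  induction hv with
  | zero => exact Sp.zero _
  | step hx _ ih => exact Sp.step (h _ hx) ih

theorem sp_of_perm {L L' : List Nat} (h : L.Perm L') {v : Nat} (hv : Sp L v) : Sp L' v :=
  sp_mono (fun a ha => h.mem_iff.1 ha) hv

theorem sp_mem {L : List Nat} {x : Nat} (h : x ∈ L) : Sp L x := by
  simpa using Sp.step h (Sp.zero L)

theorem sp_xor {L : List Nat} {a b : Nat} (ha : Sp L a) (hb : Sp L b) : Sp L (a ^^^ b) := by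
  induction ha with
  | zero => simpa using hb
  | step hx _ ih =>
    rename_i x v
    have := Sp.step hx ih
    rwa [← Nat.xor_assoc] at this

theorem sp_cons {b : Nat} {A : List Nat} {v : Nat} :
    Sp (b :: A) v ↔ Sp A v ∨ Sp A (v ^^^ b) := by
  constructor
  · intro h
    have key : ∀ (L : List Nat) (v : Nat), Sp L v → L = b :: A → Sp A v ∨ Sp A (v ^^^ b) := by
      intro L v h
      induction h with
      | zero => intro _; left; exact Sp.zero _
      | step hx hv ih =>
        rename_i L x w
        intro hL; subst hL
        rcases List.mem_cons.1 hx with rfl | hxA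
        · rcases ih rfl with h1 | h2
          · right
            have he : (x ^^^ w) ^^^ x = w := by rw [Nat.xor_comm x w, Nat.xor_xor_cancel_right]
            rwa [he]
          · left; rwa [Nat.xor_comm x w]
        · rcases ih rfl with h1 | h2
          · left; exact Sp.step hxA h1
          · right; rw [Nat.xor_assoc]; exact Sp.step hxA h2
    exact key _ _ h rfl
  · intro h
    rcases h with h | h
    · exact sp_mono (fun a ha => List.mem_cons_of_mem _ ha) h
    · have hb : Sp (b :: A) (v ^^^ b) := sp_mono (fun a ha => List.mem_cons_of_mem _ ha) h
      have hmem : b ∈ b :: A := List.mem_cons_self ..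
      have := sp_xor (sp_mem hmem) hb
      rwa [Nat.xor_comm b (v ^^^ b), Nat.xor_xor_cancel_right] at this

theorem sp_bitclear {L : List Nat} {t : Nat} (hL : ∀ a ∈ L, a.testBit t = false)
    {v : Nat} (hv : Sp L v) : v.testBit t = false := by
  induction hv with
  | zero => simp
  | step hx _ ih => rename_i x w; rw [Nat.testBit_xor, hL _ hx, ih]; rfl

def Dep (L : List Nat) : Prop := ∃ x M, L.Perm (x :: M) ∧ Sp M x

theorem dep_perm {L L' : List Nat} (h : L.Perm L') (hd : Dep L) : Dep L' := by
  obtain ⟨x, M, hp, hs⟩ := hd; exact ⟨x, M, h.symm.trans hp, hs⟩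

theorem dep_head {x : Nat} {T : List Nat} (h : Sp T x) : Dep (x :: T) := ⟨x, T, List.Perm.refl _, h⟩

theorem dep_cons_of {T : List Nat} (h : Dep T) (x : Nat) : Dep (x :: T) := by
  obtain ⟨y, M, hp, hs⟩ := h
  exact ⟨y, x :: M, (hp.cons x).trans (List.Perm.swap y x M),
    sp_mono (fun a ha => List.mem_cons_of_mem _ ha) hs⟩

-- ===== Section 3: exchange lemmas and pigeonhole =====
theorem dep_sep {v t : Nat} {R : List Nat} (hv : v.testBit t = true)
    (hR : ∀ w ∈ R, w.testBit t = false) : Dep (v :: R) ↔ Dep R := by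
  constructor
  · rintro ⟨x, M, hp, hs⟩
    have h1 := (List.cons_perm_iff_perm_erase).1 hp.symm
    by_cases hxv : x = v
    · subst hxv
      rw [List.erase_cons_head] at h1
      have hxbit : x.testBit t = false :=
        sp_bitclear (fun a ha => hR _ (h1.2.mem_iff.1 ha)) hs
      rw [hxbit] at hv; cases hv
    · have hxR : x ∈ R := by
        rcases List.mem_cons.1 h1.1 with h | h
        · exact absurd h hxv
        · exact h
      have herase : (v :: R).erase x = v :: R.erase x := by
        rw [List.erase_cons_tail]
        simp [Ne.symm hxv]
      rw [herase] at h1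
      have hsx : Sp (v :: R.erase x) x := sp_of_perm h1.2 hs
      rcases sp_cons.1 hsx with h2 | h2
      · exact ⟨x, R.erase x, List.perm_cons_erase hxR, h2⟩
      · have hbit : (x ^^^ v).testBit t = false :=
          sp_bitclear (fun a ha => hR _ (List.mem_of_mem_erase ha)) h2
        rw [Nat.testBit_xor, hR _ hxR, hv] at hbit; cases hbit
  · intro h; exact dep_cons_of h v

theorem dxg_aux {T : List Nat} {s x : Nat} (hs : Sp T s) (hd : Dep (x :: T)) :
    Dep ((x ^^^ s) :: T) := by
  obtain ⟨y, M, hp, hsy⟩ := hd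
  have h1 := (List.cons_perm_iff_perm_erase).1 hp.symm
  by_cases hyx : y = x
  · subst hyx
    rw [List.erase_cons_head] at h1
    have : Sp T y := sp_of_perm h1.2 hsy
    exact dep_head (sp_xor this hs)
  · have hyT : y ∈ T := by
      rcases List.mem_cons.1 h1.1 with h | h
      · exact absurd h hyx
      · exact h
    have herase : (x :: T).erase y = x :: T.erase y := by
      rw [List.erase_cons_tail]; simp [Ne.symm hyx]
    rw [herase] at h1
    have hsy' : Sp (x :: T.erase y) y := sp_of_perm h1.2 hsy
    have hpermT : T.Perm (y :: T.erase y) := List.perm_cons_erase hyT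
    have hperm2 : ((x ^^^ s) :: T).Perm (y :: (x ^^^ s) :: T.erase y) :=
      ((hpermT.cons _).trans (List.Perm.swap _ _ _))
    have hsub : ∀ a ∈ T.erase y, a ∈ T := fun a ha => List.mem_of_mem_erase ha
    rcases sp_cons.1 hsy' with h2 | h2
    · exact ⟨y, (x ^^^ s) :: T.erase y, hperm2,
        sp_mono (fun a ha => List.mem_cons_of_mem _ ha) h2⟩
    · -- Sp (T.erase y) (y ^^^ x)
      have hsT' : Sp (y :: T.erase y) s := sp_of_perm hpermT hs
      rcases sp_cons.1 hsT' with h3 | h3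
      · -- Sp T' s : y = (y^^^x) ^^^ (x^^^s) ^^^ s
        have c1 : Sp ((x ^^^ s) :: T.erase y) (y ^^^ x) :=
          sp_mono (fun a ha => List.mem_cons_of_mem _ ha) h2
        have c2 : Sp ((x ^^^ s) :: T.erase y) (x ^^^ s) := sp_mem (List.mem_cons_self ..)
        have c3 : Sp ((x ^^^ s) :: T.erase y) s :=
          sp_mono (fun a ha => List.mem_cons_of_mem _ ha) h3
        have hy : ((y ^^^ x) ^^^ ((x ^^^ s) ^^^ s)) = y := by
          rw [Nat.xor_assoc x s s, Nat.xor_self, Nat.xor_zero, Nat.xor_assoc,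
            Nat.xor_self, Nat.xor_zero]
        have := sp_xor c1 (sp_xor c2 c3)
        rw [hy] at this
        exact ⟨y, (x ^^^ s) :: T.erase y, hperm2, this⟩
      · -- Sp T' (s ^^^ y) : then x ^^^ s ∈ Sp T'
        have hxs : Sp (T.erase y) (x ^^^ s) := by
          have := sp_xor h3 h2
          have he : ((s ^^^ y) ^^^ (y ^^^ x)) = x ^^^ s := by
            rw [Nat.xor_assoc s y (y ^^^ x), ← Nat.xor_assoc y y x, Nat.xor_self,
              Nat.zero_xor, Nat.xor_comm s x]
          rwa [he] at this
        exact dep_head (sp_mono hsub hxs)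

theorem depXorGen {T : List Nat} {s x : Nat} (hs : Sp T s) :
    Dep (x :: T) ↔ Dep ((x ^^^ s) :: T) := by
  constructor
  · exact dxg_aux hs
  · intro h
    have := dxg_aux hs h
    rwa [Nat.xor_xor_cancel_right] at this

theorem dep_toggle {v : Nat} {f : Nat → Nat} (hf : ∀ w, f w = w ∨ f w = w ^^^ v) :
    ∀ (R C : List Nat), Dep (v :: (C ++ R)) ↔ Dep (v :: (C ++ R.map f)) := by
  intro R
  induction R with
  | nil => intro C; simp
  | cons w R ih =>
    intro C
    have step1 : Dep (v :: (C ++ w :: R)) ↔ Dep (v :: (C ++ f w :: R)) := by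
      rcases hf w with h | h
      · rw [h]
      · have hperm1 : (v :: (C ++ w :: R)).Perm (w :: v :: (C ++ R)) :=
          ((List.perm_middle.cons v).trans (List.Perm.swap _ _ _))
        have hperm2 : (v :: (C ++ (w ^^^ v) :: R)).Perm ((w ^^^ v) :: v :: (C ++ R)) :=
          ((List.perm_middle.cons v).trans (List.Perm.swap _ _ _))
        have hsv : Sp (v :: (C ++ R)) v := sp_mem (List.mem_cons_self ..)
        rw [h]
        constructor
        · intro hd
          exact dep_perm hperm2.symm ((depXorGen hsv).1 (dep_perm hperm1 hd))
        · intro hd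
          exact dep_perm hperm1.symm ((depXorGen hsv).2 (dep_perm hperm2 hd))
    have step2 := ih (C ++ [f w])
    simp only [List.append_assoc, List.singleton_append] at step2
    rw [step1, step2]; simp

theorem dep_pigeonhole : ∀ (d : Nat) (L : List Nat), (∀ x ∈ L, x < 2 ^ d) → d < L.length → Dep L := by
  intro d
  induction d with
  | zero =>
    intro L hb hl
    cases L with
    | nil => simp at hl
    | cons w L' =>
      have : w = 0 := by have := hb w (List.mem_cons_self ..); omega
      subst this
      exact ⟨0, L', List.Perm.refl _, Sp.zero _⟩
  | succ d ih =>
    intro L hb hl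
    by_cases hex : ∃ v ∈ L, v.testBit d = true
    · obtain ⟨v, hvL, hbit⟩ := hex
      set R := L.erase v with hRdef
      have hperm : L.Perm (v :: R) := List.perm_cons_erase hvL
      set f : Nat → Nat := fun w => if w.testBit d then w ^^^ v else w with hfdef
      have hf : ∀ w, f w = w ∨ f w = w ^^^ v := by
        intro w; by_cases h : w.testBit d <;> simp [hfdef, h]
      have hmapbound : ∀ x ∈ R.map f, x < 2 ^ d := by
        intro x hx
        obtain ⟨u, huR, rfl⟩ := List.mem_map.1 hx
        have huL : u ∈ L := List.mem_of_mem_erase huR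
        have hu : u < 2 ^ (d + 1) := hb _ huL
        have hv : v < 2 ^ (d + 1) := hb _ hvL
        by_cases h : u.testBit d
        · have h1 : (u ^^^ v) < 2 ^ (d + 1) := Nat.xor_lt_two_pow hu hv
          have h2 : (u ^^^ v).testBit d = false := by rw [Nat.testBit_xor, h, hbit]; rfl
          simp only [hfdef, h, if_true]
          exact pvLtOfClear h1 h2
        · simp only [hfdef, h, if_false]
          exact pvLtOfClear hu (by simpa using h)
      have hlen : d < (R.map f).length := by
        rw [List.length_map, hRdef, List.length_erase_of_mem hvL]
        omega
      have hdep : Dep (R.map f) := ih _ hmapbound hlen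
      have h1 : Dep (v :: R.map f) := dep_cons_of hdep v
      have h2 : Dep (v :: R) := by
        have := (dep_toggle hf R []).2 (by simpa using h1)
        simpa using this
      exact dep_perm hperm.symm h2
    · push_neg at hex
      have hb' : ∀ x ∈ L, x < 2 ^ d := by
        intro x hx
        exact pvLtOfClear (hb _ hx) (by simpa using hex x hx)
      exact ih _ hb' (by omega)

-- ===== Section 4: the Nat-level model of A (column elimination) and its correctness =====
def gaussN : List Nat → Bool
  | [] => true
  | r0 :: rs =>
    match (r0 :: rs).findIdx? (fun w => w.testBit rs.length) with
    | none => false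
    | some p =>
      let v := (r0 :: rs).getD p 0
      let rest := ((r0 :: rs).set p r0).tail
      gaussN (rest.map (fun w => if w.testBit rs.length then w ^^^ v else w))
termination_by L => L.length
decreasing_by simp [rest, List.length_tail, List.length_set]

theorem swap_perm (r0 : Nat) (rs : List Nat) (p : Nat) (hp : p < (r0 :: rs).length) :
    (r0 :: rs).Perm (((r0 :: rs).getD p 0) :: ((r0 :: rs).set p r0).tail) := by
  cases p with
  | zero => simp
  | succ q =>
    have hq : q < rs.length := by simpa using hp
    have hrs : rs = rs.take q ++ rs[q] :: rs.drop (q + 1) := by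
      conv_lhs => rw [← List.take_append_drop q rs]
      rw [List.drop_eq_getElem_cons hq]
    have hset : rs.set q r0 = rs.take q ++ r0 :: rs.drop (q + 1) := by
      rw [List.set_eq_take_append_cons_drop]; simp [hq]
    have hgd : (r0 :: rs).getD (q + 1) 0 = rs[q] := by
      rw [List.getD_cons_succ, List.getD_eq_getElem _ _ hq]
    simp only [List.set_cons_succ, List.tail_cons, hgd]
    have s1 : (r0 :: rs).Perm (r0 :: (rs[q] :: (rs.take q ++ rs.drop (q + 1)))) := by
      conv_lhs => rw [hrs]
      exact (List.perm_middle).cons r0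
    have s2 : (r0 :: (rs[q] :: (rs.take q ++ rs.drop (q + 1)))).Perm
        (rs[q] :: (r0 :: (rs.take q ++ rs.drop (q + 1)))) := List.Perm.swap _ _ _
    have s3 : (rs[q] :: (r0 :: (rs.take q ++ rs.drop (q + 1)))).Perm
        (rs[q] :: rs.set q r0) := by
      rw [hset]
      exact (List.perm_middle.symm).cons _
    exact (s1.trans s2).trans s3

theorem gaussN_correct : ∀ (L : List Nat), (∀ x ∈ L, x < 2 ^ L.length) →
    (gaussN L = true ↔ ¬ Dep L) := by
  have main : ∀ (n : Nat) (L : List Nat), L.length = n → (∀ x ∈ L, x < 2 ^ L.length) →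
      (gaussN L = true ↔ ¬ Dep L) := by
    intro n
    induction n using Nat.strong_induction_on with
    | _ n ih =>
      intro L hlen hb
      match L with
      | [] =>
        simp only [gaussN]
        constructor
        · rintro - ⟨x, M, hp, -⟩
          exact absurd hp.length_eq (by simp)
        · intro _; trivial
      | r0 :: rs =>
        set t := rs.length with ht
        rw [gaussN]
        cases hfind : (r0 :: rs).findIdx? (fun w => w.testBit t) with
        | none =>
          have hall : ∀ w ∈ r0 :: rs, w.testBit t = false := by
            intro w hw
            exact List.findIdx?_eq_none_iff.1 hfind w hw
          have hb' : ∀ w ∈ r0 :: rs, w < 2 ^ t := by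
            intro w hw
            have : w < 2 ^ (t + 1) := by
              have := hb w hw; simpa [ht] using this
            exact pvLtOfClear this (hall w hw)
          have hdep : Dep (r0 :: rs) := dep_pigeonhole t _ hb' (by simp [ht])
          simp [hdep]
        | some p =>
          obtain ⟨hp, hpbit, -⟩ := List.findIdx?_eq_some_iff_getElem.1 hfind
          set v := (r0 :: rs).getD p 0 with hv
          set rest := ((r0 :: rs).set p r0).tail with hrest
          set f : Nat → Nat := fun w => if w.testBit t then w ^^^ v else w with hf
          have hvelem : v = (r0 :: rs)[p] := List.getD_eq_getElem _ _ hp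
          have hvbit : v.testBit t = true := by rw [hvelem]; exact hpbit
          have hperm : (r0 :: rs).Perm (v :: rest) := swap_perm r0 rs p hp
          have hmemrest : ∀ a ∈ rest, a ∈ r0 :: rs := by
            intro a ha
            have : a ∈ (r0 :: rs).set p r0 := List.mem_of_mem_tail ha
            rcases List.mem_or_eq_of_mem_set this with h | rfl
            · exact h
            · exact List.mem_cons_self ..
          have hbr : ∀ a ∈ rest, a < 2 ^ (t + 1) := by
            intro a ha; have := hb a (hmemrest a ha); simpa [ht] using this
          have hvlt : v < 2 ^ (t + 1) := by
            have := hb v (hperm.mem_iff.2 (List.mem_cons_self ..)); simpa [ht] using this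
          have hmapb : ∀ a ∈ rest.map f, a < 2 ^ t := by
            intro a ha
            obtain ⟨u, hu, rfl⟩ := List.mem_map.1 ha
            by_cases h : u.testBit t
            · have h1 : u ^^^ v < 2 ^ (t + 1) := Nat.xor_lt_two_pow (hbr u hu) hvlt
              have h2 : (u ^^^ v).testBit t = false := by
                rw [Nat.testBit_xor, h, hvbit]; rfl
              simpa [hf, h] using pvLtOfClear h1 h2
            · have h2 : u.testBit t = false := by simpa using h
              simpa [hf, h] using pvLtOfClear (hbr u hu) h2
          have hlenrest : rest.length = t := by
            simp [hrest, List.length_tail, List.length_set, ht]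
          have hn : rs.length + 1 = n := by simpa using hlen
          have hrec := ih t (by omega) (rest.map f) (by simp [hlenrest])
            (by rw [List.length_map, hlenrest]; exact hmapb)
          have hmapclear : ∀ a ∈ rest.map f, a.testBit t = false := by
            intro a ha; exact Nat.testBit_lt_two_pow (hmapb a ha)
          have hfchoice : ∀ w, f w = w ∨ f w = w ^^^ v := by
            intro w; by_cases h : w.testBit t <;> simp [hf, h]
          have hdepchain : Dep (r0 :: rs) ↔ Dep (rest.map f) := by
            calc Dep (r0 :: rs) ↔ Dep (v :: rest) :=
                  ⟨dep_perm hperm, dep_perm hperm.symm⟩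
              _ ↔ Dep (v :: rest.map f) := by
                  have := dep_toggle hfchoice rest []
                  simpa using this
              _ ↔ Dep (rest.map f) := dep_sep hvbit hmapclear
          rw [hrec, hdepchain]
  intro L hb
  exact main L.length L rfl hb

-- ===== Section 5: XOR-basis theory and correctness of altRows =====
def entriesOf (basis : List Nat) : List Nat := basis.filter (fun w => w ≠ 0)

def GoodB (basis : List Nat) : Prop :=
  ∀ i (h : i < basis.length), basis[i] ≠ 0 → basis[i].log2 = i

theorem sp_entries {basis : List Nat} {w : Nat} : Sp basis w ↔ Sp (entriesOf basis) w := by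
  constructor
  · intro h
    induction h with
    | zero => exact Sp.zero _
    | step hx hv ihh =>
      rename_i x v
      by_cases hx0 : x = 0
      · subst hx0; simpa using ihh
      · exact Sp.step (List.mem_filter.2 ⟨hx, by simp [hx0]⟩) ihh
  · exact sp_mono (fun a ha => (List.mem_filter.1 ha).1)

def maskSum : List Bool → List Nat → Nat
  | _, [] => 0
  | [], _ :: _ => 0
  | b :: bs, e :: es => (if b then e else 0) ^^^ maskSum bs es

theorem maskSum_replicate_false : ∀ (E : List Nat), maskSum (List.replicate E.length false) E = 0 := by
  intro E
  induction E with
  | nil => rfl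
  | cons e es ih => simpa [maskSum, List.replicate_succ] using ih

theorem maskSum_set_flip : ∀ (E : List Nat) (sel : List Bool) (i : Nat),
    sel.length = E.length → (h : i < E.length) →
    maskSum (sel.set i (!sel.getD i false)) E = E[i] ^^^ maskSum sel E := by
  intro E
  induction E with
  | nil => intro sel i _ h; simp at h
  | cons e es ih =>
    intro sel i hlen h
    match sel with
    | [] => simp at hlen
    | b :: bs =>
      cases i with
      | zero =>
        cases b <;>
          simp [maskSum, ← Nat.xor_assoc, Nat.xor_self, Nat.zero_xor]
      | succ j =>
        have hlen' : bs.length = es.length := by simpa using hlen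
        have hj : j < es.length := by simpa using h
        have := ih bs j hlen' hj
        simp only [maskSum, List.getD_cons_succ, List.set_cons_succ, List.getElem_cons_succ, this]
        rw [Nat.xor_comm (if b then e else 0) (es[j] ^^^ maskSum bs es), Nat.xor_assoc,
          Nat.xor_comm (maskSum bs es) (if b then e else 0), ← Nat.xor_assoc]

theorem spRep {E : List Nat} {w : Nat} (h : Sp E w) :
    ∃ sel : List Bool, sel.length = E.length ∧ maskSum sel E = w := by
  induction h with
  | zero => exact ⟨List.replicate E.length false, by simp, maskSum_replicate_false E⟩
  | step hx hv ihh =>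
    rename_i x v
    obtain ⟨sel, hlen, hms⟩ := ihh
    obtain ⟨i, hi, hEi⟩ := List.getElem_of_mem hx
    refine ⟨sel.set i (!sel.getD i false), by simp [hlen], ?_⟩
    rw [maskSum_set_flip E sel i hlen hi, hms, hEi]

theorem maskSum_top : ∀ (B : List Nat) (k : Nat) (sel : List Bool),
    (∀ i (h : i < B.length), B[i] ≠ 0 → B[i].log2 = i + k) →
    maskSum sel B ≠ 0 →
    k ≤ (maskSum sel B).log2 ∧ B.getD ((maskSum sel B).log2 - k) 0 ≠ 0 := by
  intro B
  induction B with
  | nil => intro k sel _ hne; cases sel <;> simp [maskSum] at hne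
  | cons e B' ih =>
    intro k sel hgood hne
    match sel with
    | [] => simp [maskSum] at hne
    | b :: bs =>
      have hgood' : ∀ i (h : i < B'.length), B'[i] ≠ 0 → B'[i].log2 = i + (k + 1) := by
        intro i hi hne'
        have := hgood (i + 1) (by simpa using Nat.succ_lt_succ hi) (by simpa using hne')
        simpa [Nat.add_comm, Nat.add_assoc, Nat.add_left_comm] using this
      simp only [maskSum] at hne ⊢
      set w' := maskSum bs B' with hw'
      by_cases hw'0 : w' = 0
      · -- w = if b then e else 0, nonzero
        rw [hw'0, Nat.xor_zero] at hne ⊢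
        have hb : b = true := by cases b <;> simp_all
        subst hb
        simp only [if_true] at hne ⊢
        have he := hgood 0 (by simp) (by simpa using hne)
        simp only [List.getElem_cons_zero] at he
        rw [he]
        constructor
        · omega
        · simpa using hne
      · have ihh := ih (k + 1) bs hgood' hw'0
        have hko : k + 1 ≤ w'.log2 := ihh.1
        by_cases hsel : (if b then e else 0) = 0
        · rw [hsel, Nat.zero_xor] at hne ⊢
          refine ⟨by omega, ?_⟩
          have : w'.log2 - k = (w'.log2 - (k + 1)) + 1 := by omega
          rw [this, List.getD_cons_succ]
          exact ihh.2
        · -- b = true, e ≠ 0, and w' ≠ 0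
          have hb : b = true := by cases b <;> simp_all
          subst hb
          simp only [if_true] at hsel hne ⊢
          have he := hgood 0 (by simp) (by simpa using hsel)
          simp only [List.getElem_cons_zero] at he
          set m := w'.log2 with hm
          have hw'r := pvLog2Range hw'0
          have helt : e < 2 ^ m := by
            have : e < 2 ^ (e.log2 + 1) := (pvLog2Range hsel).2
            calc e < 2 ^ (e.log2 + 1) := this
              _ ≤ 2 ^ m := Nat.pow_le_pow_right (by omega) (by omega)
          have hbitm : (e ^^^ w').testBit m = true := by
            rw [Nat.testBit_xor, Nat.testBit_lt_two_pow helt,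
              pvTestBitOfBetween hw'r.1 hw'r.2]
            rfl
          have hxlt : e ^^^ w' < 2 ^ (m + 1) :=
            Nat.xor_lt_two_pow (by omega) hw'r.2
          have hlog : (e ^^^ w').log2 = m := pvLog2Eq (pvGeOfTestBit hbitm) hxlt
          rw [hlog]
          refine ⟨by omega, ?_⟩
          have : m - k = (m - (k + 1)) + 1 := by omega
          rw [this, List.getD_cons_succ]
          exact ihh.2

theorem sp_basis_top {basis : List Nat} (hg : GoodB basis) {w : Nat}
    (hs : Sp basis w) (hne : w ≠ 0) : basis.getD w.log2 0 ≠ 0 := by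
  obtain ⟨sel, hlen, hms⟩ := spRep hs
  have := maskSum_top basis 0 sel (fun i hi hne' => by simpa using hg i hi hne') (by rw [hms]; exact hne)
  rw [hms] at this
  simpa using this.2

-- entries of a good basis are pairwise distinct values, each determined by its top bit
theorem entries_count_le_one {basis : List Nat} (hg : GoodB basis) (x : Nat) (hx : x ≠ 0) :
    (entriesOf basis).count x ≤ 1 := by
  by_contra h
  have h2 : (List.replicate 2 x).Sublist (entriesOf basis) :=
    List.replicate_sublist_iff.mpr (by omega)
  have h3 : (List.replicate 2 x).Sublist basis := h2.trans List.filter_sublist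
  rw [show List.replicate 2 x = x :: [x] from rfl] at h3
  obtain ⟨r1, r2, hb, hxr1, hsub⟩ := List.cons_sublist_iff.1 h3
  have hxr2 : x ∈ r2 := hsub.subset (by simp)
  obtain ⟨i, hi, hir1⟩ := List.getElem_of_mem hxr1
  obtain ⟨j, hj, hjr2⟩ := List.getElem_of_mem hxr2
  subst hb
  have hgi : i < (r1 ++ r2).length := by simp; omega
  have e1 : (r1 ++ r2)[i]'hgi = x := by
    rw [List.getElem_append_left hi]; exact hir1
  have hgj : r1.length + j < (r1 ++ r2).length := by simp; omega
  have e2 : (r1 ++ r2)[r1.length + j]'hgj = x := by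
    rw [List.getElem_append_right (by omega)]
    simpa using hjr2
  have l1 := hg i hgi (by rw [e1]; exact hx)
  rw [e1] at l1
  have l2 := hg _ hgj (by rw [e2]; exact hx)
  rw [e2] at l2
  omega

theorem indep_entries {basis : List Nat} (hg : GoodB basis) : ¬ Dep (entriesOf basis) := by
  rintro ⟨x, M, hp, hs⟩
  have hxE : x ∈ entriesOf basis := hp.mem_iff.2 (List.mem_cons_self ..)
  have hx0 : x ≠ 0 := by simpa using (List.mem_filter.1 hxE).2
  obtain ⟨i, hi, hxi⟩ := List.getElem_of_mem (List.mem_filter.1 hxE).1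
  have hilog : i = x.log2 := by rw [← hg i hi (hxi ▸ hx0), hxi]
  -- count of x in entries is 1, so M has none
  have hcount : (entriesOf basis).count x = M.count x + 1 := by
    have := hp.count_eq x
    simpa [List.count_cons] using this
  have hc1 := entries_count_le_one hg x hx0
  have hMx : x ∉ M := by
    rw [← List.count_pos_iff]; omega
  -- members of M live in basis with position i zeroed out
  set basis' := basis.set i 0 with hb'
  have hg' : GoodB basis' := by
    intro j hj hne
    have hjb : j < basis.length := by simpa [hb'] using hj
    have : basis'[j] = if i = j then 0 else basis[j] := List.getElem_set (by simpa using hjb)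
    by_cases hij : i = j
    · rw [this, if_pos hij] at hne; exact absurd rfl hne
    · rw [this, if_neg hij] at hne ⊢
      exact hg j hjb hne
  have hmem : ∀ a ∈ M, a ∈ basis' := by
    intro a ha
    have haE : a ∈ entriesOf basis := hp.mem_iff.2 (List.mem_cons_of_mem _ ha)
    have ha0 : a ≠ 0 := by simpa using (List.mem_filter.1 haE).2
    have hax : a ≠ x := fun h => hMx (h ▸ ha)
    obtain ⟨j, hj, haj⟩ := List.getElem_of_mem (List.mem_filter.1 haE).1
    have hij : i ≠ j := by
      rintro rfl
      exact hax (by rw [← haj, ← hxi])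
    have : basis'[j]'(by simpa [hb'] using hj) = basis[j] := by
      rw [List.getElem_set]; simp [hij]
    rw [← this] at haj
    exact haj ▸ List.getElem_mem _
  have hsx : Sp basis' x := sp_mono hmem hs
  have := sp_basis_top hg' hsx hx0
  have hzero : basis'.getD x.log2 0 = 0 := by
    rw [← hilog, hb']
    rw [List.getD_eq_getElem _ _ (by simpa using hi), List.getElem_set]
    simp
  exact this hzero

-- bit_length on positive Nat is log2 + 1
theorem bitLen_log2 : ∀ {m : Nat}, 0 < m → PySem.Int.bitLength (m : Int) = m.log2 + 1 := by
  intro m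
  induction m using Nat.strong_induction_on with
  | _ m ih =>
    intro hm
    rcases Nat.lt_or_ge m 2 with h2 | h2
    · have : m = 1 := by omega
      subst this
      rw [PySem.Int.bitLength_natCast (by omega)]
      decide
    · have hd : 0 < m / 2 := by omega
      rw [PySem.Int.bitLength_natCast (by omega), ih (m / 2) (by omega) hd]
      conv_rhs => rw [Nat.log2_def]
      simp [h2]

theorem ared_install {basis : List Nat} (hg : GoodB basis) :
    ∀ (cur : Nat), cur < 2 ^ basis.length → ∀ {basis' : List Nat},
    altReduce basis cur = some basis' →
    ∃ c, c ≠ 0 ∧ c < 2 ^ basis.length ∧ basis.getD c.log2 0 = 0 ∧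
      basis' = basis.set c.log2 c ∧ Sp basis (cur ^^^ c) := by
  intro cur
  induction cur using Nat.strong_induction_on with
  | _ cur ih =>
    intro hlt basis' h
    rw [altReduce] at h
    by_cases h0 : cur = 0
    · simp [h0] at h
    · simp only [h0, if_false] at h
      rw [bitLen_log2 (by omega)] at h
      simp only [Nat.add_sub_cancel] at h
      set b := cur.log2 with hb
      set v := basis.getD b 0 with hv
      by_cases hv0 : v = 0
      · rw [if_neg (show ¬ v ≠ 0 by simp [hv0])] at h
        cases h
        exact ⟨cur, h0, hlt, by rw [← hv, hv0], by rw [hb], by simpa using Sp.zero basis⟩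
      · have hblen : b < basis.length := by
          by_contra hge
          rw [hv, List.getD_eq_default _ _ (by omega)] at hv0
          exact hv0 rfl
        have hvel : v = basis[b] := by rw [hv, List.getD_eq_getElem _ _ hblen]
        have hvlog : v.log2 = b := by rw [hvel]; exact hg b hblen (hvel ▸ hv0)
        have hvlt : v < 2 ^ basis.length := by
          have := (pvLog2Range hv0).2
          calc v < 2 ^ (v.log2 + 1) := this
            _ ≤ 2 ^ basis.length := Nat.pow_le_pow_right (by omega) (by rw [hvlog]; omega)
        have hguard : cur ^^^ v < cur := pvXorLtOfLog2Eq h0 hv0 (by rw [hvlog])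
        rw [if_pos hv0, dif_pos hguard] at h
        obtain ⟨c, hc0, hclt, hcd, hcb, hcs⟩ := ih _ hguard (Nat.xor_lt_two_pow hlt hvlt) h
        refine ⟨c, hc0, hclt, hcd, hcb, ?_⟩
        have hvmem : v ∈ basis := hvel ▸ List.getElem_mem _
        have := Sp.step hvmem hcs
        have he : v ^^^ ((cur ^^^ v) ^^^ c) = cur ^^^ c := by
          rw [← Nat.xor_assoc, ← Nat.xor_assoc, Nat.xor_comm v cur, Nat.xor_assoc cur v v,
            Nat.xor_self, Nat.xor_zero]
        rwa [he] at this

theorem ared_sp_of_none {basis : List Nat} (hg : GoodB basis) :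
    ∀ (cur : Nat), altReduce basis cur = none → Sp basis cur := by
  intro cur
  induction cur using Nat.strong_induction_on with
  | _ cur ih =>
    intro h
    rw [altReduce] at h
    by_cases h0 : cur = 0
    · subst h0; exact Sp.zero _
    · simp only [h0, if_false] at h
      rw [bitLen_log2 (by omega)] at h
      simp only [Nat.add_sub_cancel] at h
      set b := cur.log2 with hb
      set v := basis.getD b 0 with hv
      by_cases hv0 : v = 0
      · rw [if_neg (show ¬ v ≠ 0 by simp [hv0])] at h
        cases h
      · have hblen : b < basis.length := by
          by_contra hge
          rw [hv, List.getD_eq_default _ _ (by omega)] at hv0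
          exact hv0 rfl
        have hvel : v = basis[b] := by rw [hv, List.getD_eq_getElem _ _ hblen]
        have hvlog : v.log2 = b := by rw [hvel]; exact hg b hblen (hvel ▸ hv0)
        have hguard : cur ^^^ v < cur := pvXorLtOfLog2Eq h0 hv0 (by rw [hvlog])
        rw [if_pos hv0, dif_pos hguard] at h
        have := ih _ hguard h
        have hvmem : v ∈ basis := hvel ▸ List.getElem_mem _
        have h2 := Sp.step hvmem this
        rwa [← Nat.xor_assoc, Nat.xor_comm v cur, Nat.xor_assoc, Nat.xor_self, Nat.xor_zero] at h2

theorem entries_set_perm {basis : List Nat} {b : Nat} (hb : b < basis.length)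
    (hz : basis[b] = 0) {cur : Nat} (hc : cur ≠ 0) :
    (entriesOf (basis.set b cur)).Perm (cur :: entriesOf basis) := by
  have hdec : basis = basis.take b ++ basis[b] :: basis.drop (b + 1) := by
    conv_lhs => rw [← List.take_append_drop b basis]
    rw [List.drop_eq_getElem_cons hb]
  have hset : basis.set b cur = basis.take b ++ cur :: basis.drop (b + 1) := by
    rw [List.set_eq_take_append_cons_drop]; simp [hb]
  rw [hset]
  conv_rhs => rw [hdec]
  unfold entriesOf
  rw [List.filter_append, List.filter_append, List.filter_cons, List.filter_cons]
  simp only [hz, hc]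
  rw [if_pos (by simp [hc]), if_neg (by simp)]
  exact List.perm_middle

theorem alt_correct : ∀ (rows : List Nat) (basis : List Nat), GoodB basis →
    (∀ x ∈ rows, x < 2 ^ basis.length) →
    (altRows basis rows = true ↔ ¬ Dep (entriesOf basis ++ rows)) := by
  intro rows
  induction rows with
  | nil =>
    intro basis hg _
    simp only [altRows, List.append_nil]
    simpa using indep_entries hg
  | cons x rest ih =>
    intro basis hg hb
    have hxlt : x < 2 ^ basis.length := hb x (List.mem_cons_self ..)
    rw [altRows]
    cases hred : altReduce basis x with
    | none =>
      have hsx : Sp basis x := ared_sp_of_none hg x hred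
      have hsx' : Sp (entriesOf basis ++ rest) x :=
        sp_mono (fun a ha => List.mem_append_left _ ha) (sp_entries.1 hsx)
      have hdep : Dep (entriesOf basis ++ x :: rest) :=
        dep_perm List.perm_middle.symm (dep_head hsx')
      simp [hdep]
    | some basis' =>
      obtain ⟨c, hc0, hclt, hcd, hcb, hcs⟩ := ared_install hg x hxlt hred
      have hcllen : c.log2 < basis.length := pvLog2Lt hc0 hclt
      have hlen' : basis'.length = basis.length := by rw [hcb]; simp
      have hzel : basis[c.log2] = 0 := by
        have := hcd
        rwa [List.getD_eq_getElem _ _ hcllen] at this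
      have hg' : GoodB basis' := by
        intro j hj hne
        have hjb : j < basis.length := by rwa [hlen'] at hj
        have hset : basis'[j] = if c.log2 = j then c else basis[j] := by
          rw [List.getElem_of_eq hcb, List.getElem_set]
        by_cases hcj : c.log2 = j
        · rw [hset, if_pos hcj]; exact hcj
        · rw [hset, if_neg hcj] at hne ⊢
          exact hg j hjb hne
      have hperm' : (entriesOf basis').Perm (c :: entriesOf basis) := by
        rw [hcb]; exact entries_set_perm hcllen hzel hc0
      have hrec := ih basis' hg'
        (fun a ha => by rw [hlen']; exact hb a (List.mem_cons_of_mem _ ha))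
      rw [hrec]
      -- Dep (E ++ x :: rest) ↔ Dep (E' ++ rest)
      have hs : Sp (entriesOf basis ++ rest) (x ^^^ c) :=
        sp_mono (fun a ha => List.mem_append_left _ ha) (sp_entries.1 hcs)
      have hchain : Dep (entriesOf basis ++ x :: rest) ↔ Dep (entriesOf basis' ++ rest) := by
        calc Dep (entriesOf basis ++ x :: rest)
            ↔ Dep (x :: (entriesOf basis ++ rest)) :=
              ⟨dep_perm List.perm_middle, dep_perm List.perm_middle.symm⟩
          _ ↔ Dep ((x ^^^ (x ^^^ c)) :: (entriesOf basis ++ rest)) := depXorGen hs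
          _ ↔ Dep (c :: (entriesOf basis ++ rest)) := by rw [Nat.xor_xor_cancel_left]
          _ ↔ Dep (entriesOf basis' ++ rest) := by
              have hp : (entriesOf basis' ++ rest).Perm (c :: (entriesOf basis ++ rest)) :=
                hperm'.append_right rest
              exact ⟨dep_perm hp.symm, dep_perm hp⟩
      rw [hchain]

-- ===== Section 6: bridging Python ints to masked Nats =====
-- ibit x i = bit i of x in infinite two's complement
def ibit (x : Int) (i : Nat) : Bool :=
  if 0 ≤ x then x.toNat.testBit i else !((-x - 1).toNat.testBit i)

-- absN n x = x mod 2^n, the low n bits of x, as a Nat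
def absN (n : Nat) (x : Int) : Nat := (x % ((2 : Int) ^ n)).toNat

theorem absN_lt (n : Nat) (x : Int) : absN n x < 2 ^ n := by
  have hpos : (0 : Int) < 2 ^ n := by positivity
  have h1 : 0 ≤ x % (2:Int) ^ n := Int.emod_nonneg x (by omega)
  have h2 : x % (2:Int) ^ n < 2 ^ n := Int.emod_lt_of_pos x hpos
  have h3 : ((absN n x : Nat) : Int) = x % (2:Int) ^ n := Int.toNat_of_nonneg h1
  have h4 : ((absN n x : Nat) : Int) < (((2:Nat) ^ n : Nat) : Int) := by
    rw [h3]; push_cast; exact h2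
  exact_mod_cast h4

theorem neg_emod_eq {n : Nat} {x : Int} (hx : x < 0) :
    x % ((2 : Int) ^ n) = ((2 ^ n - 1 - ((-x - 1).toNat % 2 ^ n) : Nat) : Int) := by
  set y : Nat := (-x - 1).toNat with hy
  have hxy : x = -1 - (y : Int) := by
    have : ((-x - 1).toNat : Int) = -x - 1 := Int.toNat_of_nonneg (by omega)
    omega
  have hy' : y % 2 ^ n < 2 ^ n := Nat.mod_lt _ (by positivity)
  have hdecomp : x = ((2 ^ n - 1 - y % 2 ^ n : Nat) : Int) + (2 : Int) ^ n * (-1 - (y / 2 ^ n : Nat)) := by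
    rw [hxy]
    have hdm : (2 ^ n : Nat) * (y / 2 ^ n) + y % 2 ^ n = y := Nat.div_add_mod y (2 ^ n)
    have hy2 : ((2 ^ n * (y / 2 ^ n) + y % 2 ^ n : Nat) : Int) = (y : Int) := by
      exact_mod_cast congrArg (fun (k : Nat) => (k : Int)) hdm
    push_cast at hy2
    have h1n : (1 : Nat) ≤ 2 ^ n := Nat.one_le_two_pow
    have hrval : ((2 ^ n - 1 - y % 2 ^ n : Nat) : Int)
        = (2 : Int) ^ n - 1 - ((y % 2 ^ n : Nat) : Int) := by
      push_cast [Nat.cast_sub (by omega : y % 2 ^ n ≤ 2 ^ n - 1), Nat.cast_sub h1n]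
      ring
    rw [hrval, ← hy2]
    push_cast
    ring
  calc x % (2 : Int) ^ n
      = (((2 ^ n - 1 - y % 2 ^ n : Nat) : Int) + (2 : Int) ^ n * (-1 - (y / 2 ^ n : Nat))) % (2 : Int) ^ n := by
        rw [← hdecomp]
    _ = ((2 ^ n - 1 - y % 2 ^ n : Nat) : Int) % (2 : Int) ^ n := by
        rw [Int.add_mul_emod_self_left]
    _ = ((2 ^ n - 1 - y % 2 ^ n : Nat) : Int) := by
        apply Int.emod_eq_of_lt (by positivity)
        have : (2 ^ n - 1 - y % 2 ^ n : Nat) < 2 ^ n := by omega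
        exact_mod_cast this

theorem absN_testBit (n : Nat) (x : Int) (i : Nat) :
    (absN n x).testBit i = (decide (i < n) && ibit x i) := by
  by_cases hx : 0 ≤ x
  · unfold absN ibit
    rw [if_pos hx]
    have h2n : ((2 : Int) ^ n) = ((2 ^ n : Nat) : Int) := by push_cast; ring
    have : (x % (2 : Int) ^ n).toNat = x.toNat % 2 ^ n := by
      rw [h2n, Int.toNat_emod hx (by positivity), Int.toNat_natCast]
    rw [this, Nat.testBit_mod_two_pow]
  · unfold absN ibit
    rw [if_neg hx]
    rw [neg_emod_eq (by omega), Int.toNat_natCast]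
    set y : Nat := (-x - 1).toNat with hy
    have hy' : y % 2 ^ n < 2 ^ n := Nat.mod_lt _ (by positivity)
    rw [pvMaskSubEqXor n (y % 2 ^ n) hy', Nat.testBit_xor,
      Nat.testBit_two_pow_sub_one, Nat.testBit_mod_two_pow]
    by_cases hi : i < n <;> simp [hi]

theorem ibit_bxor (x y : Int) (i : Nat) :
    ibit (PySem.Int.bxor x y) i = ((ibit x i).xor (ibit y i)) := by
  have hneg : ∀ (c : Nat), ¬ (0 ≤ (-(c:Int) - 1)) := by intro c; omega
  have htn : ∀ (c : Nat), (-(-(c:Int) - 1) - 1).toNat = c := by intro c; omega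
  unfold ibit PySem.Int.bxor
  by_cases hx : 0 ≤ x <;> by_cases hy : 0 ≤ y <;>
    simp only [hx, hy, if_true, if_false, hneg, htn, Int.toNat_natCast]
  all_goals simp [Nat.testBit_xor]

theorem absN_bxor (n : Nat) (x y : Int) :
    absN n (PySem.Int.bxor x y) = absN n x ^^^ absN n y := by
  apply Nat.eq_of_testBit_eq
  intro i
  rw [Nat.testBit_xor, absN_testBit, absN_testBit, absN_testBit, ibit_bxor]
  by_cases hi : i < n <;> simp [hi]

theorem band_pow_ne (x : Int) (t : Nat) :
    (PySem.Int.band x ((1 : Int) <<< t) ≠ 0) ↔ ibit x t = true := by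
  have hshift : ((1 : Int) <<< t) = ((2 ^ t : Nat) : Int) := by
    rw [Int.shiftLeft_eq]; push_cast; ring
  rw [hshift]
  unfold PySem.Int.band ibit
  by_cases hx : 0 ≤ x
  · rw [if_pos hx, if_pos (by positivity), if_pos hx, Int.toNat_natCast]
    rw [Nat.and_two_pow]
    rcases hb : x.toNat.testBit t <;> simp [hb]
  · rw [if_neg hx, if_pos (by positivity), if_neg hx, Int.toNat_natCast]
    rw [Nat.and_comm, Nat.and_two_pow]
    rcases hb : (-x - 1).toNat.testBit t
    · simp
    · simp

theorem pymod_eq_absN (n : Nat) (x : Int) :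
    (PySem.Int.mod x ((1 : Int) <<< n)).toNat = absN n x := by
  have hshift : ((1 : Int) <<< n) = (2 : Int) ^ n := by rw [Int.shiftLeft_eq]; ring
  unfold PySem.Int.mod absN
  rw [hshift, Int.fmod_eq_emod]
  simp [show (0:Int) ≤ 2 ^ n by positivity]

theorem entries_replicate (N : Nat) : entriesOf (List.replicate N 0) = [] := by
  unfold entriesOf
  induction N with
  | zero => rfl
  | succ k ih => rw [List.replicate_succ, List.filter_cons]; simpa using ih

theorem goodB_replicate (N : Nat) : GoodB (List.replicate N 0) := by
  intro i hi hne
  rw [List.getElem_replicate] at hne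
  exact absurd rfl hne

theorem getD_set_lt (l : List Int) (j : Nat) (v : Int) (i : Nat) (hi : i < l.length) :
    (l.set j v).getD i 0 = if j = i then v else l.getD i 0 := by
  rw [List.getD_eq_getElem _ _ (by simpa using hi), List.getElem_set]
  by_cases h : j = i
  · rw [if_pos h, if_pos h]
  · rw [if_neg h, if_neg h, List.getD_eq_getElem _ _ hi]

-- ===== Section 7: the ports compute gaussN / altRows on the masked rows =====
theorem pivotBridge (rows : List Int) (N t : Nat) (hN : N ≤ rows.length) (ht : t < N) :
    ∀ (j : Nat), j ≤ N →
    pivotFind rows ((1 : Int) <<< t) (PySem.List.pyRange (j : Int) (N : Int) 1)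
      = Option.map (fun k => ((j + k : Nat) : Int))
          ((((rows.take N).drop j).map (fun x => absN N x)).findIdx? (fun w => w.testBit t)) := by
  intro j hj
  induction hfuel : N - j generalizing j with
  | zero =>
    have hjN : j = N := by omega
    subst hjN
    rw [PySem.List.pyRange_one_eq_nil (by omega)]
    rw [List.drop_eq_nil_of_le (by simp [hN])]
    rfl
  | succ k ih =>
    have hjN : j < N := by omega
    have hjlen : j < rows.length := by omega
    have htake : j < (rows.take N).length := by simp; omega
    rw [PySem.List.pyRange_one_cons (by exact_mod_cast hjN)]
    rw [List.drop_eq_getElem_cons htake, List.getElem_take]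
    simp only [List.map_cons, List.findIdx?_cons]
    have hget : PySem.List.pyGetD rows (j : Int) 0 = rows[j] := by
      rw [PySem.List.pyGetD_natCast, List.getD_eq_getElem _ _ hjlen]
    have hcond : (PySem.Int.band (PySem.List.pyGetD rows (j : Int) 0) ((1 : Int) <<< t) ≠ 0)
        ↔ (absN N rows[j]).testBit t = true := by
      rw [hget, band_pow_ne, absN_testBit]
      simp [ht]
    rw [pivotFind]
    by_cases hc : (absN N rows[j]).testBit t = true
    · rw [if_pos (hcond.2 hc), hc]
      simp
    · rw [if_neg (fun h => hc (hcond.1 h))]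
      rw [show ((j : Int) + 1) = ((j + 1 : Nat) : Int) by push_cast; ring]
      rw [ih (j + 1) (by omega) (by omega)]
      have hb : ((absN N rows[j]).testBit t) = false := by
        cases h : (absN N rows[j]).testBit t
        · rfl
        · exact absurd h hc
      rw [hb]
      simp only [Bool.false_eq_true, if_false, Option.map_map]
      congr 1
      funext p
      simp
      push_cast
      ring

theorem elimStep_len (cb cm : Int) (rs : List Int) (r : Int) :
    (elimStep cb cm rs r).length = rs.length := by
  unfold elimStep
  split
  · exact PySem.List.length_pySetD ..
  · rfl

theorem elimFold_len (cb cm : Int) : ∀ (l : List Int) (rows1 : List Int),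
    (l.foldl (elimStep cb cm) rows1).length = rows1.length := by
  intro l
  induction l with
  | nil => intro rows1; rfl
  | cons r l ih => intro rows1; rw [List.foldl_cons, ih, elimStep_len]

theorem elimFold_get (colMask : Int) (rows1 : List Int) (C : Nat) (hC : C < rows1.length) :
    ∀ (m : Nat), m ≤ rows1.length → ∀ i (hi : i < rows1.length),
    ((PySem.List.pyRange 0 (m : Int) 1).foldl (elimStep (C : Int) colMask) rows1).getD i 0
      = if i < m ∧ i ≠ C ∧ PySem.Int.band (rows1[i]) colMask ≠ 0
        then PySem.Int.bxor (rows1[i]) (rows1[C]) else rows1[i] := by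
  intro m
  induction m with
  | zero =>
    intro _ i hi
    rw [show ((0 : Nat) : Int) = 0 from rfl, PySem.List.pyRange_one_eq_nil (by omega)]
    simp only [List.foldl_nil]
    rw [List.getD_eq_getElem _ _ hi]
    simp
  | succ m ih =>
    intro hm i hi
    have hmlt : m < rows1.length := by omega
    have hsplit : PySem.List.pyRange 0 ((m + 1 : Nat) : Int) 1
        = PySem.List.pyRange 0 (m : Nat) 1 ++ [(m : Int)] := by
      rw [show ((m + 1 : Nat) : Int) = (m : Int) + 1 by push_cast; ring]
      exact PySem.List.pyRange_one_succ_right (by omega)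
    rw [hsplit, List.foldl_append]
    have key := ih (by omega)
    set res := (PySem.List.pyRange 0 ((m : Nat) : Int) 1).foldl (elimStep (C : Int) colMask) rows1 with hres
    have hreslen : res.length = rows1.length := elimFold_len _ _ _ _
    have hresm : PySem.List.pyGetD res (m : Int) 0 = rows1[m] := by
      rw [PySem.List.pyGetD_natCast, key m hmlt]
      simp
    have hresC : PySem.List.pyGetD res (C : Int) 0 = rows1[C] := by
      rw [PySem.List.pyGetD_natCast, key C hC]
      simp
    simp only [List.foldl_cons, List.foldl_nil]
    unfold elimStep
    by_cases hcond : ((m : Int) ≠ (C : Int) ∧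
        PySem.Int.band (PySem.List.pyGetD res (m : Int) 0) colMask ≠ 0)
    · rw [if_pos hcond, hresm, hresC, PySem.List.pySetD_natCast]
      have hsetget : (res.set m (PySem.Int.bxor (rows1[m]) (rows1[C]))).getD i 0
          = if m = i then PySem.Int.bxor (rows1[m]) (rows1[C]) else res.getD i 0 := by
        rw [List.getD_eq_getElem _ _ (by rw [List.length_set, hreslen]; exact hi),
          List.getElem_set]
        by_cases hmi : m = i
        · rw [if_pos hmi, if_pos hmi]
        · rw [if_neg hmi, if_neg hmi, List.getD_eq_getElem _ _ (by rw [hreslen]; exact hi)]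
      rw [hsetget]
      have hmC : m ≠ C := fun h => hcond.1 (by exact_mod_cast congrArg (fun (k : Nat) => (k : Int)) h)
      have hband : PySem.Int.band (rows1[m]) colMask ≠ 0 := by rw [← hresm]; exact hcond.2
      by_cases him : m = i
      · subst him
        rw [if_pos rfl, if_pos ⟨by omega, hmC, hband⟩]
      · rw [if_neg him, key i hi]
        have hiff : (i < m ∧ i ≠ C ∧ PySem.Int.band (rows1[i]) colMask ≠ 0)
            ↔ (i < m + 1 ∧ i ≠ C ∧ PySem.Int.band (rows1[i]) colMask ≠ 0) := by
          constructor
          · rintro ⟨h1, h2⟩; exact ⟨by omega, h2⟩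
          · rintro ⟨h1, h2⟩
            have : i ≠ m := fun h => him h.symm
            exact ⟨by omega, h2⟩
        by_cases hc2 : (i < m ∧ i ≠ C ∧ PySem.Int.band (rows1[i]) colMask ≠ 0)
        · rw [if_pos hc2, if_pos (hiff.1 hc2)]
        · rw [if_neg hc2, if_neg (fun h => hc2 (hiff.2 h))]
    · rw [if_neg hcond, key i hi]
      -- either m = C or rows1[m] has no bit: the m-th condition is false anyway
      by_cases him : m = i
      · subst him
        have hfalse : ¬ (m < m + 1 ∧ m ≠ C ∧ PySem.Int.band (rows1[m]) colMask ≠ 0) := by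
          rintro ⟨-, h2, h3⟩
          exact hcond ⟨by exact_mod_cast fun h => h2 (by exact_mod_cast h), by rwa [hresm]⟩
        have hfalse' : ¬ (m < m ∧ m ≠ C ∧ PySem.Int.band (rows1[m]) colMask ≠ 0) := by
          rintro ⟨h1, -⟩; omega
        rw [if_neg hfalse, if_neg hfalse']
      · have hiff : (i < m ∧ i ≠ C ∧ PySem.Int.band (rows1[i]) colMask ≠ 0)
            ↔ (i < m + 1 ∧ i ≠ C ∧ PySem.Int.band (rows1[i]) colMask ≠ 0) := by
          constructor
          · rintro ⟨h1, h2⟩; exact ⟨by omega, h2⟩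
          · rintro ⟨h1, h2⟩
            have : i ≠ m := fun h => him h.symm
            exact ⟨by omega, h2⟩
        by_cases hc2 : (i < m ∧ i ≠ C ∧ PySem.Int.band (rows1[i]) colMask ≠ 0)
        · rw [if_pos hc2, if_pos (hiff.1 hc2)]
        · rw [if_neg hc2, if_neg (fun h => hc2 (hiff.2 h))]

-- ===== Section 8: the main bridge for port A =====
theorem gaussBridge (N : Nat) : ∀ (k : Nat) (rows : List Int) (c : Nat),
    c + k = N → N ≤ rows.length →
    gaussLoop (N : Int) rows (PySem.List.pyRange (c : Int) (N : Int) 1)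
      = gaussN (((rows.take N).drop c).map (fun x => absN N x)) := by
  intro k
  induction k with
  | zero =>
    intro rows c hc hlen
    rw [PySem.List.pyRange_one_eq_nil (by omega)]
    rw [List.drop_eq_nil_of_le (by simp; omega), List.map_nil]
    simp [gaussLoop, gaussN]
  | succ k ih =>
    intro rows c hc hlen
    have hcN : c < N := by omega
    have hclen : c < rows.length := by omega
    set t : Nat := N - 1 - c with htdef
    have htN : t < N := by omega
    rw [PySem.List.pyRange_one_cons (by exact_mod_cast hcN)]
    rw [gaussLoop]
    have hmask : (1 : Int) <<< ((N : Int) - 1 - (c : Int)).toNat = (1 : Int) <<< t := by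
      congr 1
      omega
    -- the masked suffix and its head
    have htklen : ((rows.take N).drop c).length = N - c := by simp; omega
    have hheadlt : c < (rows.take N).length := by simp; omega
    have hSm : ((rows.take N).drop c).map (fun x => absN N x)
        = absN N (rows[c]) :: (((rows.take N).drop (c + 1)).map (fun x => absN N x)) := by
      rw [List.drop_eq_getElem_cons hheadlt, List.getElem_take, List.map_cons]
    have hrslen : ((((rows.take N).drop (c + 1)).map (fun x => absN N x))).length = t := by
      simp; omega
    rw [hmask, pivotBridge rows N t hlen htN c (by omega), hSm, gaussN, hrslen]
    cases hfind : ((absN N (rows[c]) :: (((rows.take N).drop (c + 1)).map (fun x => absN N x))).findIdx?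
        (fun w => w.testBit t)) with
    | none => simp
    | some pm =>
      simp only [Option.map_some]
      obtain ⟨hpmlt, hpmbit, -⟩ := List.findIdx?_eq_some_iff_getElem.1 hfind
      have hpmlen : pm < N - c := by
        simp at hpmlt
        omega
      have hPlen : c + pm < rows.length := by omega
      have hgetP : PySem.List.pyGetD rows ((c + pm : Nat) : Int) 0 = rows[c + pm] := by
        rw [PySem.List.pyGetD_natCast, List.getD_eq_getElem _ _ hPlen]
      have hgetc : PySem.List.pyGetD rows ((c : Nat) : Int) 0 = rows[c] := by
        rw [PySem.List.pyGetD_natCast, List.getD_eq_getElem _ _ hclen]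
      rw [hgetP, hgetc, PySem.List.pySetD_natCast, PySem.List.pySetD_natCast]
      have hR1len : ((rows.set c (rows[c + pm])).set (c + pm) (rows[c])).length = rows.length := by
        simp
      have hR2len : ((PySem.List.pyRange 0 (N : Int) 1).foldl (elimStep ((c : Nat) : Int) ((1 : Int) <<< t))
          ((rows.set c (rows[c + pm])).set (c + pm) (rows[c]))).length = rows.length := by
        rw [elimFold_len, hR1len]
      rw [show ((c : Int) + 1) = (((c + 1 : Nat)) : Int) by push_cast; ring]
      rw [ih _ (c + 1) (by omega) (by rw [hR2len]; omega)]
      congr 1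
      apply List.ext_getElem
      · simp [hR2len]
      · intro j hj1 hj2
        have hjlen : j < N - c - 1 := by
          simp [hR2len] at hj1
          omega
        have hilen : c + 1 + j < rows.length := by omega
        have hiN : c + 1 + j < N := by omega
        -- value of the swapped list at any index
        have hR1getD : ∀ i (hi : i < rows.length),
            ((rows.set c (rows[c + pm])).set (c + pm) (rows[c])).getD i 0
              = if c + pm = i then rows[c] else if c = i then rows[c + pm] else rows[i]'hi := by
          intro i hi
          rw [getD_set_lt _ _ _ _ (by simpa using hi), getD_set_lt _ _ _ _ hi,
            List.getD_eq_getElem _ _ hi]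
        have hR1C : ((rows.set c (rows[c + pm])).set (c + pm) (rows[c])).getD c 0 = rows[c + pm] := by
          rw [hR1getD c hclen]
          by_cases h : c + pm = c
          · rw [if_pos h]
            have hpm0 : pm = 0 := by omega
            simp [hpm0]
          · rw [if_neg h, if_pos rfl]
        have hR2get := elimFold_get ((1 : Int) <<< t)
          ((rows.set c (rows[c + pm])).set (c + pm) (rows[c])) c
          (by rw [hR1len]; exact hclen) N (by rw [hR1len]; omega)
        -- LHS element
        rw [List.getElem_map, List.getElem_drop, List.getElem_take]
        -- RHS element
        rw [List.getElem_map, List.getElem_tail, List.getElem_set]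
        have hvm : ((absN N (rows[c]) :: (((rows.take N).drop (c + 1)).map (fun x => absN N x))).getD pm 0)
            = absN N (rows[c + pm]) := by
          cases pm with
          | zero => simp
          | succ q =>
            rw [List.getD_cons_succ]
            rw [List.getD_eq_getElem _ _ (by simp; omega)]
            rw [List.getElem_map, List.getElem_drop, List.getElem_take]
            have : c + 1 + q = c + (q + 1) := by omega
            simp only [this]
        have htailval : ∀ (hq : j + 1 < (absN N (rows[c]) :: (((rows.take N).drop (c + 1)).map (fun x => absN N x))).length),
            (absN N (rows[c]) :: (((rows.take N).drop (c + 1)).map (fun x => absN N x)))[j + 1]'hq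
              = absN N (rows[c + 1 + j]) := by
          intro hq
          rw [List.getElem_cons_succ, List.getElem_map, List.getElem_drop, List.getElem_take]
        -- the element of the eliminated matrix
        have hR2i : ((PySem.List.pyRange 0 (N : Int) 1).foldl (elimStep ((c : Nat) : Int) ((1 : Int) <<< t))
              ((rows.set c (rows[c + pm])).set (c + pm) (rows[c])))[c + 1 + j]'(by rw [hR2len]; exact hilen)
            = if PySem.Int.band (if pm = j + 1 then rows[c] else rows[c + 1 + j]) ((1 : Int) <<< t) ≠ 0
              then PySem.Int.bxor (if pm = j + 1 then rows[c] else rows[c + 1 + j]) (rows[c + pm])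
              else (if pm = j + 1 then rows[c] else rows[c + 1 + j]) := by
          have hw1 : ((rows.set c (rows[c + pm])).set (c + pm) (rows[c]))[c + 1 + j]'(by rw [hR1len]; exact hilen)
              = if pm = j + 1 then rows[c] else rows[c + 1 + j] := by
            rw [← List.getD_eq_getElem _ 0 (by rw [hR1len]; exact hilen), hR1getD _ hilen]
            by_cases hpm : pm = j + 1
            · rw [if_pos (by omega : c + pm = c + 1 + j), if_pos hpm]
            · rw [if_neg (by omega : ¬ c + pm = c + 1 + j), if_neg (by omega : ¬ c = c + 1 + j),
                if_neg hpm]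
          have hw1C : ((rows.set c (rows[c + pm])).set (c + pm) (rows[c]))[c]'(by rw [hR1len]; exact hclen)
              = rows[c + pm] := by
            rw [← List.getD_eq_getElem _ 0 (by rw [hR1len]; exact hclen), hR1C]
          have := hR2get (c + 1 + j) (by rw [hR1len]; exact hilen)
          rw [← List.getD_eq_getElem _ 0 (by rw [hR2len]; exact hilen), this, hw1, hw1C]
          by_cases hband : PySem.Int.band (if pm = j + 1 then rows[c] else rows[c + 1 + j]) ((1 : Int) <<< t) ≠ 0
          · rw [if_pos ⟨hiN, by omega, hband⟩, if_pos hband]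
          · rw [if_neg (by rintro ⟨-, -, h⟩; exact hband h), if_neg hband]
        rw [htailval, hR2i, hvm]
        set w1 : Int := if pm = j + 1 then rows[c] else rows[c + 1 + j] with hw1def
        have habs : (if pm = j + 1 then absN N (rows[c])
            else absN N (rows[c + 1 + j])) = absN N w1 := by
          by_cases hpm : pm = j + 1
          · rw [hw1def, if_pos hpm, if_pos hpm]
          · rw [hw1def, if_neg hpm, if_neg hpm]
        have hcondb : (PySem.Int.band w1 ((1 : Int) <<< t) ≠ 0) ↔ ((absN N w1).testBit t = true) := by
          rw [band_pow_ne, absN_testBit]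
          simp [htN]
        by_cases hpm : pm = j + 1
        · rw [if_pos hpm]
          rw [show absN N (rows[c]) = absN N w1 by rw [hw1def, if_pos hpm]]
          by_cases hband : PySem.Int.band w1 ((1 : Int) <<< t) ≠ 0
          · rw [if_pos hband, if_pos (hcondb.1 hband), absN_bxor]
          · have hbitf : (absN N w1).testBit t = false := by
              cases h : (absN N w1).testBit t
              · rfl
              · exact absurd (hcondb.2 h) hband
            rw [if_neg hband, if_neg (by simp [hbitf])]
        · rw [if_neg hpm]
          rw [show absN N (rows[c + 1 + j]) = absN N w1 by rw [hw1def, if_neg hpm]]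
          by_cases hband : PySem.Int.band w1 ((1 : Int) <<< t) ≠ 0
          · rw [if_pos hband, if_pos (hcondb.1 hband), absN_bxor]
          · have hbitf : (absN N w1).testBit t = false := by
              cases h : (absN N w1).testBit t
              · rfl
              · exact absurd (hcondb.2 h) hband
            rw [if_neg hband, if_neg (by simp [hbitf])]

-- ===== Section 9: both ports compute the same rank check =====
theorem ports_agree (M : List Int) (n : Int) (hpre : n ≤ (M.length : Int)) :
    is_invertible_f2 M n = is_invertible_f2_alt M n := by
  by_cases hn : n ≤ 0
  · unfold is_invertible_f2 is_invertible_f2_alt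
    rw [if_pos hn, PySem.List.pyRange_one_eq_nil hn]
    rfl
  · have hn0 : (0 : Int) < n := by omega
    set N := n.toNat with hN
    have hNeq : ((N : Nat) : Int) = n := Int.toNat_of_nonneg (by omega)
    have hNlen : N ≤ M.length := by omega
    set L : List Nat := (M.take N).map (fun x => absN N x) with hL
    have hLlen : L.length = N := by simp [hL]; omega
    have hLbound : ∀ x ∈ L, x < 2 ^ L.length := by
      intro x hx
      rw [hLlen]
      obtain ⟨y, -, rfl⟩ := List.mem_map.1 hx
      exact absN_lt N y
    -- A side
    have hA : is_invertible_f2 M n = gaussN L := by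
      unfold is_invertible_f2
      rw [← hNeq, show ((0 : Int)) = ((0 : Nat) : Int) from rfl]
      rw [gaussBridge N N M 0 (by omega) hNlen]
      rw [List.drop_zero]
    -- B side
    have hB : is_invertible_f2_alt M n = altRows (List.replicate N 0) L := by
      unfold is_invertible_f2_alt
      rw [if_neg hn]
      congr 1
      rw [PySem.List.slice_to M (by omega : (0:Int) ≤ n)]
      apply List.map_congr_left
      intro x hx
      rw [pymod_eq_absN]
    have hAc := gaussN_correct L hLbound
    have hBc := alt_correct L (List.replicate N 0) (goodB_replicate N)
      (by intro x hx; rw [List.length_replicate]; rw [hLlen] at hLbound; exact hLbound x hx)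
    rw [entries_replicate, List.nil_append] at hBc
    rw [hA, hB]
    rw [Bool.eq_iff_iff]
    exact hAc.trans hBc.symm

-- ===== VERDICT (by name: the statement is the Claim_ definition above) =====
theorem is_invertible_f2_spec : Claim_equal_is_invertible_f2 := by
  intro M n _hdom hpre
  unfold Spec_is_invertible_f2
  exact ports_agree M n hpre
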